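-- pv_equiv track=rewrite | github.com/ralako/priklady | zadanie.py | check
-- ===== SOURCE A (Python) =====
-- def check(string):
--     if string[0] == '+':
--         string = string[1:]
--     cisloStr = ''
--     odstran = []
--     odstranenePocet = 0
--
--     for i in range(len(string)):
--         try:
--             cifra = int(string[i])
--             cisloStr += string[i]
--         except:
--             if string[i] in ['x','y','z','\\','n']:
--                 if cisloStr != '':
--                     if int(cisloStr) == 1:
--                         odstran.append(i-1-odstranenePocet)
--                         odstranenePocet += 1
--             cisloStr = ''
--
--     for i in range(len(string)):
--         if i in odstran:
--             string = string[:i] + string[i+1:]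
--
--     return string.replace(r'+-',r'-').replace(r'{+',r'{').replace(r'--',r'+').replace(r'-+',r'-').replace(r'++',r'+')
-- ===== SOURCE B (Python) =====
-- def check(string):
--     string = string.removeprefix('+')
--     out = []
--     run = ''
--     for ch in string:
--         if '0' <= ch <= '9':
--             out.append(ch)
--             run += ch
--         else:
--             if ch in 'xyz\\n' and run != '' and int(run) == 1:
--                 out.pop()
--             out.append(ch)
--             run = ''
--     s = ''.join(out)
--     for old, new in (('+-', '-'), ('{+', '{'), ('--', '+'), ('-+', '-'), ('++', '+')):
--         s = s.replace(old, new)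
--     return s
-- ===== Notes on version B (the rewrite author's own statement) =====
-- stated objective: faster
-- what changed: Single left-to-right pass that pops the trailing digit of a value-1 run directly from the output list, replacing A's three-phase scheme (collect offset-adjusted deletion indices, then a second index loop with an 'i in odstran' scan and string re-slicing per index); B also handles the empty string instead of raising.
import Mathlib
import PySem

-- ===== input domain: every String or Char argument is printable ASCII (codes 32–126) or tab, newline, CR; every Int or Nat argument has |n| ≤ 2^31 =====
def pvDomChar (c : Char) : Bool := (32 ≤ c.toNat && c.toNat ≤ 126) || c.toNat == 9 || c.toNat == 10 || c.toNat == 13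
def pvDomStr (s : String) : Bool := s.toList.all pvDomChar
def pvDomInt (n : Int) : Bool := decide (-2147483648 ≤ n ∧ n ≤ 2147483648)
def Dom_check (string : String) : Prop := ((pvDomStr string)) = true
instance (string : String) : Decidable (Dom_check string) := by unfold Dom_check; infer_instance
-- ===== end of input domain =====

-- B does the normalization in ONE left-to-right pass (popping the trailing digit of a value-1 run
-- directly from the output) instead of A's three phases (collect offset-adjusted deletion indices,
-- re-slice the string in a second index loop with an 'i in odstran' scan per index, then the replace
-- chain); objective: faster (O(n) vs A's quadratic second phase; measured).

-- ===== PORT A =====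
-- ['x','y','z','\\','n'] (Python list of 1-char strings; membership of the 1-char string string[i])
def pvSpecials : List Char := ['x', 'y', 'z', '\\', 'n']

-- loop body of A's first loop ("try: cifra = int(string[i]); cisloStr += string[i] except: …");
-- state = (cisloStr, odstran, odstranenePocet); i is always in range, so pyGetD's default is never used;
-- int(cisloStr) inside the handler cannot raise (cisloStr is a nonempty digit string), so the test
-- "int(cisloStr) == 1" is ported as "ofChars? st.1 == some 1".
def pvStepA (l : List Char) (st : List Char × List Int × Int) (i : Int) : List Char × List Int × Int :=
  let c := PySem.List.pyGetD l i ' '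
  if (PySem.Int.ofChars? [c]).isSome then
    (st.1 ++ [c], st.2.1, st.2.2)
  else
    if pvSpecials.contains c then
      if st.1 ≠ [] then
        if PySem.Int.ofChars? st.1 == some 1 then
          ([], st.2.1 ++ [i - 1 - st.2.2], st.2.2 + 1)
        else ([], st.2.1, st.2.2)
      else ([], st.2.1, st.2.2)
    else ([], st.2.1, st.2.2)

-- loop body of A's second loop: "if i in odstran: string = string[:i] + string[i+1:]"
def pvStepDel (odstran : List Int) (s : List Char) (i : Int) : List Char :=
  if odstran.contains i then
    PySem.List.slice s none (some i) ++ PySem.List.slice s (some (i + 1)) none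
  else s

def check (string : String) : String :=
  -- if string[0] == '+': string = string[1:]   (string[0] raises IndexError on ""; Pre_check excludes "")
  let l : List Char :=
    if PySem.Str.pyGet? string 0 == some '+' then (PySem.Str.slice string (some 1) none).toList
    else string.toList
  let n : Int := (l.length : Int)
  let st := (PySem.List.pyRange 0 n 1).foldl (pvStepA l) (([], [], 0))
  let odstran := st.2.1
  let l2 := (PySem.List.pyRange 0 n 1).foldl (pvStepDel odstran) l
  String.ofList (PySem.Chars.replace (PySem.Chars.replace (PySem.Chars.replace (PySem.Chars.replace
    (PySem.Chars.replace l2 "+-".toList "-".toList) "{+".toList "{".toList) "--".toList "+".toList)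
    "-+".toList "-".toList) "++".toList "+".toList)

-- ===== PORT B =====
-- loop body of B's single pass; state = (out, run); "ch in 'xyz\\n'" is substring membership of the
-- 1-char string ch, ported as PySem.Chars.isIn [ch] …
def pvStepB (st : List Char × List Char) (ch : Char) : List Char × List Char :=
  if '0' ≤ ch ∧ ch ≤ '9' then (st.1 ++ [ch], st.2 ++ [ch])
  else
    ((if PySem.Chars.isIn [ch] "xyz\\n".toList ∧ st.2 ≠ [] ∧ PySem.Int.ofChars? st.2 = some 1
      then st.1.dropLast else st.1) ++ [ch], [])

def check_alt (string : String) : String :=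
  let l0 := string.toList
  -- string = string.removeprefix('+')
  let l := if PySem.Chars.startswith l0 "+".toList then l0.drop 1 else l0
  let st := l.foldl pvStepB ([], [])
  let s := st.1  -- ''.join(out)
  -- for old, new in (…): s = s.replace(old, new)
  String.ofList ([("+-", "-"), ("{+", "{"), ("--", "+"), ("-+", "-"), ("++", "+")].foldl
    (fun s (p : String × String) => PySem.Chars.replace s p.1.toList p.2.toList) s)

-- ===== PRECONDITION & SPEC =====
-- Pre_check excludes only the empty string, on which A raises IndexError at string[0].
def Pre_check (string : String) : Prop := string ≠ ""
instance (string : String) : Decidable (Pre_check string) := by unfold Pre_check; infer_instance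
def pvWitness_check : String := "1x+2"

def Spec_check (string : String) (out : String) : Prop := out = check_alt string
instance (string : String) (out : String) : Decidable (Spec_check string out) := by unfold Spec_check; infer_instance

-- ===== CLAIM (what is proved, stated in full; the proofs are below) =====
def Claim_equal_check : Prop := ∀ (string : String), Dom_check string → Pre_check string → Spec_check string (check string)

-- ===== LEMMAS AND PROOFS =====

-- spec-side recursion mirroring A's first loop, relative to start index i and offset p
def pvScanA : List Char → Int → List Char → Int → List Int
  | [], _, _, _ => []
  | c :: rest, i, cislo, p =>
    if (PySem.Int.ofChars? [c]).isSome then pvScanA rest (i + 1) (cislo ++ [c]) p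
    else
      if pvSpecials.contains c then
        if cislo ≠ [] then
          if PySem.Int.ofChars? cislo == some 1 then (i - 1 - p) :: pvScanA rest (i + 1) [] (p + 1)
          else pvScanA rest (i + 1) [] p
        else pvScanA rest (i + 1) [] p
      else pvScanA rest (i + 1) [] p

-- spec-side recursion mirroring B's single pass
def pvScanB : List Char → List Char → List Char → List Char
  | [], out, _ => out
  | c :: rest, out, run =>
    if '0' ≤ c ∧ c ≤ '9' then pvScanB rest (out ++ [c]) (run ++ [c])
    else pvScanB rest ((if PySem.Chars.isIn [c] "xyz\\n".toList ∧ run ≠ [] ∧ PySem.Int.ofChars? run = some 1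
                        then out.dropLast else out) ++ [c]) []

-- sequential application of A's deletions (same slice expression as pvStepDel)
def pvDelSeq : List Char → List Int → List Char
  | s, [] => s
  | s, q :: qs => pvDelSeq (PySem.List.slice s none (some q) ++ PySem.List.slice s (some (q + 1)) none) qs

set_option maxRecDepth 8192 in
lemma pvDigitTable : ∀ n ∈ List.range 128,
    ((PySem.Int.ofChars? [Char.ofNat n]).isSome = (decide ('0' ≤ Char.ofNat n ∧ Char.ofNat n ≤ '9'))) := by
  decide

lemma pvDigit_eq (c : Char) (h : pvDomChar c = true) :
    (PySem.Int.ofChars? [c]).isSome = decide ('0' ≤ c ∧ c ≤ '9') := by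
  have h128 : c.toNat < 128 := by
    simp only [pvDomChar, Bool.or_eq_true, Bool.and_eq_true, decide_eq_true_eq, beq_iff_eq] at h
    omega
  have := pvDigitTable c.toNat (List.mem_range.mpr h128)
  rwa [Char.ofNat_toNat] at this

lemma pvIsIn_singleton (c : Char) (l : List Char) : PySem.Chars.isIn [c] l ↔ l.contains c := by
  have h := PySem.Str.isIn_iff_infix (String.ofList [c]) (String.ofList l)
  rw [PySem.Str.isIn_eq] at h
  simp only [String.toList_ofList] at h
  rw [h, List.singleton_infix_iff, List.contains_iff_mem]

-- A's first loop computes pvScanA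
lemma pvLoopA (rest : List Char) : ∀ (pre cislo : List Char) (od : List Int) (p : Int),
    ((PySem.List.pyRange ((pre.length : Int)) (((pre ++ rest).length : Int)) 1).foldl
      (pvStepA (pre ++ rest)) (cislo, od, p)).2.1 = od ++ pvScanA rest (pre.length : Int) cislo p := by
  induction rest with
  | nil =>
    intro pre cislo od p
    rw [PySem.List.pyRange_one_eq_nil (by simp)]
    simp [pvScanA]
  | cons c rest ih =>
    intro pre cislo od p
    have hget : PySem.List.pyGetD (pre ++ c :: rest) ((pre.length : Int)) ' ' = c := by
      rw [PySem.List.pyGetD_natCast]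
      simp [List.getD_eq_getElem?_getD]
    have hsplit : ((pre ++ c :: rest).length : Int) = (((pre ++ [c]) ++ rest).length : Int) := by simp
    have ha1 : (pre.length : Int) + 1 = (((pre ++ [c]).length : Int)) := by simp
    have hLS : pre ++ c :: rest = (pre ++ [c]) ++ rest := by simp
    rw [PySem.List.pyRange_one_cons (by simp), List.foldl_cons]
    simp only [pvStepA, hget, pvScanA]
    by_cases hdig : (PySem.Int.ofChars? [c]).isSome
    · simp only [if_pos hdig]
      rw [hsplit, ha1]
      conv_lhs => rw [hLS]
      rw [ih (pre ++ [c]) (cislo ++ [c]) od p]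
    · simp only [if_neg hdig]
      by_cases hsp : pvSpecials.contains c
      · simp only [if_pos hsp]
        by_cases hne : cislo ≠ []
        · simp only [if_pos hne]
          by_cases h1 : PySem.Int.ofChars? cislo == some 1
          · simp only [if_pos h1]
            rw [hsplit, ha1]
            conv_lhs => rw [hLS]
            rw [ih (pre ++ [c]) [] (od ++ [(pre.length : Int) - 1 - p]) (p + 1)]
            simp
          · simp only [if_neg h1]
            rw [hsplit, ha1]
            conv_lhs => rw [hLS]
            rw [ih (pre ++ [c]) [] od p]
        · simp only [if_neg hne]
          rw [hsplit, ha1]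
          conv_lhs => rw [hLS]
          rw [ih (pre ++ [c]) [] od p]
      · simp only [if_neg hsp]
        rw [hsplit, ha1]
        conv_lhs => rw [hLS]
        rw [ih (pre ++ [c]) [] od p]

-- B's loop computes pvScanB
lemma pvLoopB (rest : List Char) : ∀ (out run : List Char),
    (rest.foldl pvStepB (out, run)).1 = pvScanB rest out run := by
  induction rest with
  | nil => intro out run; simp [pvScanB]
  | cons c rest ih =>
    intro out run
    by_cases h : '0' ≤ c ∧ c ≤ '9'
    · simp only [List.foldl_cons, pvStepB, if_pos h]; rw [ih]; simp [pvScanB, h]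
    · simp only [List.foldl_cons, pvStepB, if_neg h]; rw [ih]; simp [pvScanB, h]

-- strict monotonicity and bounds of A's (already offset-adjusted) deletion indices
lemma pvScanA_bounds (rest : List Char) : ∀ (i p : Int) (cislo : List Char),
    0 ≤ p → (cislo.length : Int) ≤ i - p →
    (pvScanA rest i cislo p).Pairwise (· < ·) ∧
      ∀ q ∈ pvScanA rest i cislo p,
        (i - p - (if cislo = [] then 0 else 1) ≤ q ∧ q < i + rest.length) := by
  induction rest with
  | nil => intro i p cislo _ _; simp [pvScanA]
  | cons c rest ih =>
    intro i p cislo h0 hc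
    simp only [pvScanA]
    by_cases hdig : (PySem.Int.ofChars? [c]).isSome
    · simp only [if_pos hdig]
      have hc' : (((cislo ++ [c]).length : Nat) : Int) ≤ (i + 1) - p := by
        simp only [List.length_append, List.length_cons, List.length_nil, Nat.cast_add, Nat.cast_one]
        omega
      obtain ⟨hpw, hb⟩ := ih (i + 1) p (cislo ++ [c]) h0 hc'
      refine ⟨hpw, fun q hq => ?_⟩
      obtain ⟨h1, h2⟩ := hb q hq
      rw [if_neg (by simp)] at h1
      constructor
      · split_ifs <;> omega
      · simp only [List.length_cons, Nat.cast_add, Nat.cast_one] at h2 ⊢; omega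
    · simp only [if_neg hdig]
      by_cases hsp : pvSpecials.contains c
      · simp only [if_pos hsp]
        by_cases hne : cislo ≠ []
        · simp only [if_pos hne]
          have hlen1 : (1 : Int) ≤ (cislo.length : Int) := by
            exact_mod_cast List.length_pos_of_ne_nil hne
          by_cases h1 : PySem.Int.ofChars? cislo == some 1
          · simp only [if_pos h1]
            obtain ⟨hpw, hb⟩ := ih (i + 1) (p + 1) [] (by omega) (by simp; omega)
            refine ⟨List.pairwise_cons.mpr ⟨fun q hq => ?_, hpw⟩, fun q hq => ?_⟩
            · obtain ⟨hlb, _⟩ := hb q hq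
              rw [if_pos rfl] at hlb
              omega
            · rw [if_neg hne]
              rcases List.mem_cons.mp hq with h | h
              · subst h; simp only [List.length_cons, Nat.cast_add, Nat.cast_one]; omega
              · obtain ⟨hlb, hub⟩ := hb q h
                rw [if_pos rfl] at hlb
                simp only [List.length_cons, Nat.cast_add, Nat.cast_one] at hub ⊢
                omega
          · simp only [if_neg h1]
            obtain ⟨hpw, hb⟩ := ih (i + 1) p [] h0 (by simp; omega)
            refine ⟨hpw, fun q hq => ?_⟩
            obtain ⟨hlb, hub⟩ := hb q hq
            rw [if_pos rfl] at hlb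
            refine ⟨?_, ?_⟩
            · split_ifs <;> omega
            · simp only [List.length_cons, Nat.cast_add, Nat.cast_one] at hub ⊢; omega
        · simp only [if_neg hne]
          obtain ⟨hpw, hb⟩ := ih (i + 1) p [] h0 (by simp; omega)
          refine ⟨hpw, fun q hq => ?_⟩
          obtain ⟨hlb, hub⟩ := hb q hq
          rw [if_pos rfl] at hlb
          refine ⟨?_, ?_⟩
          · split_ifs <;> omega
          · simp only [List.length_cons, Nat.cast_add, Nat.cast_one] at hub ⊢; omega
      · simp only [if_neg hsp]
        obtain ⟨hpw, hb⟩ := ih (i + 1) p [] h0 (by simp; omega)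
        refine ⟨hpw, fun q hq => ?_⟩
        obtain ⟨hlb, hub⟩ := hb q hq
        rw [if_pos rfl] at hlb
        refine ⟨?_, ?_⟩
        · split_ifs <;> omega
        · simp only [List.length_cons, Nat.cast_add, Nat.cast_one] at hub ⊢; omega

-- the second loop of A applies the deletions sequentially
lemma pvDelLoop_eq (od : List Int) : ∀ (s : List Char) (a n : Int),
    od.Pairwise (· < ·) → (∀ q ∈ od, a ≤ q ∧ q < n) →
    (PySem.List.pyRange a n 1).foldl (pvStepDel od) s = pvDelSeq s od := by
  induction od with
  | nil =>
    intro s a n _ _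
    rw [PySem.List.foldl_congr_mem _ (pvStepDel []) (fun acc _ => acc) s
      (by intro acc x _; simp [pvStepDel])]
    rw [PySem.List.foldl_ignore]
    rfl
  | cons q qs ih =>
    intro s a n hpw hb
    obtain ⟨haq, hqn⟩ := hb q List.mem_cons_self
    have hqs_gt : ∀ r ∈ qs, q < r := (List.pairwise_cons.mp hpw).1
    rw [PySem.List.pyRange_one_append a q n haq (le_of_lt hqn), List.foldl_append]
    have h1 : (PySem.List.pyRange a q 1).foldl (pvStepDel (q :: qs)) s = s := by
      rw [PySem.List.foldl_congr_mem _ (pvStepDel (q :: qs)) (fun acc _ => acc) s ?_,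
        PySem.List.foldl_ignore]
      intro acc x hx
      have hxq : x < q := (PySem.List.mem_pyRange_one.mp hx).2
      have hnot : ¬(x = q ∨ x ∈ qs) := by
        rintro (rfl | hr)
        · omega
        · exact absurd (hqs_gt x hr) (by omega)
      simp [pvStepDel, hnot]
    rw [h1, PySem.List.pyRange_one_cons hqn, List.foldl_cons]
    have hstep : pvStepDel (q :: qs) s q =
        PySem.List.slice s none (some q) ++ PySem.List.slice s (some (q + 1)) none := by
      simp [pvStepDel]
    rw [hstep]
    rw [PySem.List.foldl_congr_mem _ (pvStepDel (q :: qs)) (pvStepDel qs) _ ?_]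
    · exact ih _ (q + 1) n (List.pairwise_cons.mp hpw).2
        (fun r hr => ⟨by have := hqs_gt r hr; omega, (hb r (List.mem_cons_of_mem _ hr)).2⟩)
    · intro acc x hx
      have hxq : q + 1 ≤ x := (PySem.List.mem_pyRange_one.mp hx).1
      have hne : ¬ x = q := by omega
      simp [pvStepDel, hne]

-- master invariant: applying A's remaining deletions to out ++ rest yields B's scan
lemma pvMaster (rest : List Char) : ∀ (out cislo : List Char) (i p : Int),
    (∀ c ∈ rest, pvDomChar c = true) →
    i - p = (out.length : Int) →
    cislo.length ≤ out.length →
    pvDelSeq (out ++ rest) (pvScanA rest i cislo p) = pvScanB rest out cislo := by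
  induction rest with
  | nil => intro out cislo i p _ _ _; simp [pvScanA, pvScanB, pvDelSeq]
  | cons c rest ih =>
    intro out cislo i p hdom hip hc
    have hdc : pvDomChar c = true := hdom c List.mem_cons_self
    have hdom' : ∀ x ∈ rest, pvDomChar x = true := fun x hx => hdom x (List.mem_cons_of_mem _ hx)
    have hdig_eq := pvDigit_eq c hdc
    have hxyz : ("xyz\\n".toList : List Char) = pvSpecials := by decide
    simp only [pvScanA, pvScanB]
    by_cases hdig : '0' ≤ c ∧ c ≤ '9'
    · have hA : (PySem.Int.ofChars? [c]).isSome = true := by rw [hdig_eq]; exact decide_eq_true hdig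
      simp only [hA, if_pos hdig, if_true]
      rw [List.append_cons]
      rw [ih (out ++ [c]) (cislo ++ [c]) (i + 1) p hdom' (by simp; omega) (by simp; omega)]
    · have hA : (PySem.Int.ofChars? [c]).isSome = false := by
        rw [hdig_eq]; exact decide_eq_false hdig
      simp only [hA, if_neg hdig, Bool.false_eq_true, if_false]
      by_cases hP : PySem.Chars.isIn [c] "xyz\\n".toList ∧ cislo ≠ [] ∧ PySem.Int.ofChars? cislo = some 1
      · obtain ⟨hin, hne, h1⟩ := hP
        have hsp : pvSpecials.contains c := by
          rw [← hxyz]; exact (pvIsIn_singleton c _).mp (by rw [hxyz]; rw [hxyz] at hin; exact hin)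
        rw [if_pos hsp, if_pos hne, if_pos (by simp [h1])]
        rw [if_pos ⟨hin, hne, h1⟩]
        have hout1 : 1 ≤ out.length := le_trans (List.length_pos_of_ne_nil hne) hc
        have hq : i - 1 - p = ((out.length - 1 : Nat) : Int) := by
          push_cast [Nat.cast_sub hout1]
          omega
        have hq1 : i - 1 - p + 1 = ((out.length : Nat) : Int) := by omega
        show pvDelSeq _ _ = _
        rw [pvDelSeq, hq1, hq, PySem.List.slice_to_natCast, PySem.List.slice_from_natCast]
        rw [List.take_append_of_le_length (by omega), ← List.dropLast_eq_take, List.drop_left]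
        rw [show out.dropLast ++ c :: rest = (out.dropLast ++ [c]) ++ rest by simp]
        rw [ih (out.dropLast ++ [c]) [] (i + 1) (p + 1) hdom'
          (by simp [List.length_dropLast]; omega) (by simp)]
      · have hAside : (if pvSpecials.contains c then
            (if cislo ≠ [] then
              (if PySem.Int.ofChars? cislo == some 1 then
                (i - 1 - p) :: pvScanA rest (i + 1) [] (p + 1)
              else pvScanA rest (i + 1) [] p)
            else pvScanA rest (i + 1) [] p)
          else pvScanA rest (i + 1) [] p) = pvScanA rest (i + 1) [] p := by
          split_ifs with hsp hne h1
          · exfalso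
            apply hP
            refine ⟨?_, hne, by simpa using h1⟩
            rw [hxyz] 
            exact (pvIsIn_singleton c pvSpecials).mpr hsp
          · rfl
          · rfl
          · rfl
        rw [hAside, if_neg hP]
        rw [List.append_cons]
        rw [ih (out ++ [c]) [] (i + 1) p hdom' (by simp; omega) (by simp)]

-- the pre-replace strings agree
lemma pvCore (l : List Char) (hd : ∀ c ∈ l, pvDomChar c = true) :
    (PySem.List.pyRange 0 (l.length : Int) 1).foldl
        (pvStepDel (((PySem.List.pyRange 0 (l.length : Int) 1).foldl (pvStepA l) (([], [], 0))).2.1)) l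
      = (l.foldl pvStepB ([], [])).1 := by
  have hA := pvLoopA l [] [] [] 0
  simp only [List.nil_append, List.length_nil, Nat.cast_zero] at hA
  rw [hA]
  obtain ⟨hpw, hb⟩ := pvScanA_bounds l 0 0 [] le_rfl (by simp)
  rw [pvDelLoop_eq _ l 0 (l.length : Int) hpw
    (fun q hq => ⟨by simpa using (hb q hq).1, by simpa using (hb q hq).2⟩)]
  rw [pvLoopB l [] []]
  simpa using pvMaster l [] [] 0 0 hd (by simp) (by simp)

-- ===== VERDICT (by name: the statement is the Claim_ definition above) =====
theorem check_spec : Claim_equal_check := by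
  intro s hdom hpre
  unfold Spec_check check check_alt
  obtain ⟨c, t, hst⟩ : ∃ c t, s.toList = c :: t := by
    cases hs : s.toList with
    | nil => exact absurd (by simpa using congrArg String.ofList hs) hpre
    | cons c t => exact ⟨c, t, rfl⟩
  have hl : (if PySem.Str.pyGet? s 0 == some '+' then (PySem.Str.slice s (some 1) none).toList
      else s.toList)
      = (if PySem.Chars.startswith s.toList "+".toList then s.toList.drop 1 else s.toList) := by
    have hg : PySem.Str.pyGet? s 0 = some c := by simp [PySem.Str.pyGet?, hst]
    have hsw : PySem.Chars.startswith s.toList "+".toList = (c == '+') := by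
      rw [hst]; simp [PySem.Chars.startswith, List.isPrefixOf, eq_comm]
    rw [hg, hsw]
    by_cases hc : c = '+'
    · rw [if_pos (by simp [hc]), if_pos (by simp [hc])]
      simp [PySem.Str.slice, PySem.List.slice_from_one, List.drop_one]
    · rw [if_neg (by simp [hc]), if_neg (by simp [hc])]
  rw [hl]
  have hsub : (if PySem.Chars.startswith s.toList "+".toList then s.toList.drop 1 else s.toList).Sublist s.toList := by
    split_ifs
    · exact List.drop_sublist _ _
    · exact List.Sublist.refl _
  have hd : ∀ x ∈ (if PySem.Chars.startswith s.toList "+".toList then s.toList.drop 1 else s.toList),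
      pvDomChar x = true := by
    intro x hx
    have hx' : x ∈ s.toList := hsub.subset hx
    have := hdom
    unfold Dom_check pvDomStr at this
    exact List.all_eq_true.mp this x hx'
  simp only []
  rw [pvCore _ hd]
  simp only [List.foldl_cons, List.foldl_nil]
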